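-- pv_equiv track=rewrite | github.com/daniyord/advent-of-code-2024 | day12/task1.py | calculate_area1
-- ===== SOURCE A (Python) =====
-- def calculate_area1(area):
--     result = 0
--
--     for place in area:
--         place_perimeter = 4
--
--         if (place[0]-1, place[1]) in area:
--             place_perimeter -= 1
--         if (place[0], place[1]-1) in area:
--             place_perimeter -= 1
--         if (place[0]+1, place[1]) in area:
--             place_perimeter -= 1
--         if (place[0], place[1]+1) in area:
--             place_perimeter -= 1
--
--         result += place_perimeter
--
--     return result
-- ===== SOURCE B (Python) =====
-- def calculate_area1(area):
--     cells = set(area)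
--     shared = sum(1 for (x, y) in cells if (x + 1, y) in cells) \
--            + sum(1 for (x, y) in cells if (x, y + 1) in cells)
--     return 4 * len(cells) - 2 * shared
-- ===== Notes on version B (the rewrite author's own statement) =====
-- stated objective: alternative
-- what changed: B counts each internal edge once (right and down neighbours only) in a single pass over the cell set and returns 4*len(cells) - 2*shared, instead of testing four neighbour memberships per cell and summing per-cell perimeters; Pre_ only states that the list encodes a set (distinct cells), which every Python set input satisfies.
import Mathlib
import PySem

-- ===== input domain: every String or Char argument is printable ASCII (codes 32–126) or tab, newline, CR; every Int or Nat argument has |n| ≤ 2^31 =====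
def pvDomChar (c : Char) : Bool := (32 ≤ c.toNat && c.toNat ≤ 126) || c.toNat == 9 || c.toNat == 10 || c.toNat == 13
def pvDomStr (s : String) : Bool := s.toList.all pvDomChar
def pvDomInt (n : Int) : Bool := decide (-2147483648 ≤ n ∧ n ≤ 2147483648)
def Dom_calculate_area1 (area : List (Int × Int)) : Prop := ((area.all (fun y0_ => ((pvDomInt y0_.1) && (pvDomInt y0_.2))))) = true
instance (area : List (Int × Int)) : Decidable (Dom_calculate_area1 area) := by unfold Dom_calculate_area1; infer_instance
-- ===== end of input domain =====

-- B puts the cells in a set and counts each internal edge once (right/down neighbours only),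
-- returning 4*len(cells) - 2*shared, instead of four membership tests per cell.

-- ===== PORT A =====
def calculate_area1 (area : List (Int × Int)) : Int :=
  area.foldl
    (fun result place =>
      let pp : Int := 4
      let pp := if area.contains (place.1 - 1, place.2) then pp - 1 else pp
      let pp := if area.contains (place.1, place.2 - 1) then pp - 1 else pp
      let pp := if area.contains (place.1 + 1, place.2) then pp - 1 else pp
      let pp := if area.contains (place.1, place.2 + 1) then pp - 1 else pp
      result + pp)
    0

-- ===== PORT B =====
-- sums over the set do not depend on iteration order, so folding the Set's list is exact
def calculate_area1_alt (area : List (Int × Int)) : Int :=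
  let cells : PySem.Set (Int × Int) := PySem.Set.ofList area
  let shared : Int :=
    cells.foldl (fun s c => if PySem.Set.contains cells (c.1 + 1, c.2) then s + 1 else s) 0
    + cells.foldl (fun s c => if PySem.Set.contains cells (c.1, c.2 + 1) then s + 1 else s) 0
  4 * PySem.Set.len cells - 2 * shared

-- ===== PRECONDITION & SPEC =====
-- Pre_ excludes lists with duplicate cells: the input is meant to be a set of grid cells, and
-- on a duplicated cell A's per-duplicate perimeter sum is an accident of the list representation.
def Pre_calculate_area1 (area : List (Int × Int)) : Prop := area.Nodup
instance (area : List (Int × Int)) : Decidable (Pre_calculate_area1 area) := by unfold Pre_calculate_area1; infer_instance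
def pvWitness_calculate_area1 : (List (Int × Int)) := [(0, 0), (1, 0), (1, 1)]
def Spec_calculate_area1 (area : List (Int × Int)) (out : Int) : Prop := out = calculate_area1_alt area
instance (area : List (Int × Int)) (out : Int) : Decidable (Spec_calculate_area1 area out) := by unfold Spec_calculate_area1; infer_instance

-- ===== CLAIM =====
def Claim_equal_calculate_area1 : Prop := ∀ (area : List (Int × Int)), Dom_calculate_area1 area → Pre_calculate_area1 area → Spec_calculate_area1 area (calculate_area1 area)

-- ===== LEMMAS AND PROOFS =====

-- indicator of membership
def pvInd (area : List (Int × Int)) (c : Int × Int) : Int := if c ∈ area then 1 else 0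

lemma pv_sum_map_sub4 {α : Type} (xs : List α) (i1 i2 i3 i4 : α → Int) :
    (xs.map fun p => 4 - i1 p - i2 p - i3 p - i4 p).sum
      = 4 * (xs.length : Int) - (xs.map i1).sum - (xs.map i2).sum - (xs.map i3).sum - (xs.map i4).sum := by
  induction xs with
  | nil => simp
  | cons h t ih => simp only [List.map_cons, List.sum_cons, ih, List.length_cons]; push_cast; ring

lemma pv_A_eq_sum (area : List (Int × Int)) :
    calculate_area1 area
      = 4 * (area.length : Int)
        - (area.map fun p => pvInd area (p.1 - 1, p.2)).sum
        - (area.map fun p => pvInd area (p.1, p.2 - 1)).sum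
        - (area.map fun p => pvInd area (p.1 + 1, p.2)).sum
        - (area.map fun p => pvInd area (p.1, p.2 + 1)).sum := by
  have h : calculate_area1 area
      = (area.map fun p =>
          4 - pvInd area (p.1 - 1, p.2) - pvInd area (p.1, p.2 - 1)
            - pvInd area (p.1 + 1, p.2) - pvInd area (p.1, p.2 + 1)).sum := by
    unfold calculate_area1
    rw [show (fun (result : Int) (place : Int × Int) =>
          let pp : Int := 4
          let pp := if area.contains (place.1 - 1, place.2) then pp - 1 else pp
          let pp := if area.contains (place.1, place.2 - 1) then pp - 1 else pp
          let pp := if area.contains (place.1 + 1, place.2) then pp - 1 else pp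
          let pp := if area.contains (place.1, place.2 + 1) then pp - 1 else pp
          result + pp)
        = fun result place => result +
            (4 - pvInd area (place.1 - 1, place.2) - pvInd area (place.1, place.2 - 1)
               - pvInd area (place.1 + 1, place.2) - pvInd area (place.1, place.2 + 1)) from ?_,
      PySem.List.foldl_add, zero_add]
    funext result place
    simp only [pvInd, List.contains_iff_mem]
    split_ifs <;> ring
  rw [h, pv_sum_map_sub4]

-- a counting foldl is the sum of indicators
lemma pv_foldl_count (xs area : List (Int × Int)) (nb : (Int × Int) → (Int × Int)) :
    xs.foldl (fun s c => if PySem.Set.contains area (nb c) then s + 1 else s) (0 : Int)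
      = (xs.map fun p => pvInd area (nb p)).sum := by
  rw [show (fun (s : Int) (c : Int × Int) => if PySem.Set.contains area (nb c) then s + 1 else s)
        = fun s c => s + pvInd area (nb c) from ?_, PySem.List.foldl_add, zero_add]
  funext s c
  simp only [pvInd, PySem.Set.contains_eq_listContains, List.contains_iff_mem]
  split_ifs <;> ring

-- the bijection c ↦ r c / l c between cells with a left/up neighbour and cells with a right/down one
lemma pv_shift_sum (area : List (Int × Int)) (r l : (Int × Int) → (Int × Int))
    (hrl : ∀ c, r (l c) = c) (hlr : ∀ c, l (r c) = c) :
    (∑ c ∈ area.toFinset, pvInd area (l c)) = ∑ c ∈ area.toFinset, pvInd area (r c) := by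
  have h1 : (∑ c ∈ area.toFinset, pvInd area (l c))
      = ∑ c ∈ area.toFinset.filter (fun c => l c ∈ area), (1 : Int) := by
    rw [Finset.sum_filter]
    exact Finset.sum_congr rfl fun c _ => rfl
  have h2 : (∑ c ∈ area.toFinset, pvInd area (r c))
      = ∑ c ∈ area.toFinset.filter (fun c => r c ∈ area), (1 : Int) := by
    rw [Finset.sum_filter]
    exact Finset.sum_congr rfl fun c _ => rfl
  rw [h1, h2]
  refine Finset.sum_nbij' l r ?_ ?_ ?_ ?_ ?_
  · intro a ha
    simp only [Finset.mem_filter, List.mem_toFinset] at ha ⊢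
    exact ⟨ha.2, by rw [hrl]; exact ha.1⟩
  · intro a ha
    simp only [Finset.mem_filter, List.mem_toFinset] at ha ⊢
    exact ⟨ha.2, by rw [hlr]; exact ha.1⟩
  · intro a _; exact hrl a
  · intro a _; exact hlr a
  · intro a _; rfl

lemma pv_map_sum_toFinset (area : List (Int × Int)) (h : area.Nodup) (f : (Int × Int) → Int) :
    (area.map f).sum = ∑ c ∈ area.toFinset, f c := by
  rw [List.sum_toFinset _ h]

theorem pv_main (area : List (Int × Int)) (h : area.Nodup) :
    calculate_area1 area = calculate_area1_alt area := by
  unfold calculate_area1_alt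
  dsimp only
  rw [show PySem.Set.ofList area = area from PySem.Set.ofList_eq_self_of_nodup area h,
      pv_foldl_count area area (fun c => (c.1 + 1, c.2)),
      pv_foldl_count area area (fun c => (c.1, c.2 + 1)), pv_A_eq_sum]
  rw [pv_map_sum_toFinset area h, pv_map_sum_toFinset area h, pv_map_sum_toFinset area h,
      pv_map_sum_toFinset area h]
  rw [pv_shift_sum area (fun c => (c.1 + 1, c.2)) (fun c => (c.1 - 1, c.2))
        (fun c => by simp) (fun c => by simp),
      pv_shift_sum area (fun c => (c.1, c.2 + 1)) (fun c => (c.1, c.2 - 1))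
        (fun c => by simp) (fun c => by simp)]
  show _ = 4 * (area.length : Int) - 2 * _
  ring

-- ===== VERDICT =====
theorem calculate_area1_spec : Claim_equal_calculate_area1 := by
  intro area _ hpre
  unfold Spec_calculate_area1
  exact pv_main area hpre
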